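-- pv_equiv track=rewrite | github.com/mrdrozdov/lingmatic | lingmatic/engine/eval_wsj.py | to_indexed_contituents
-- ===== SOURCE A (Python) =====
-- def to_indexed_contituents(parse):
--     sp = parse.split()
--     if len(sp) == 1:
--         return set([(0, 1)])
--
--     backpointers = []
--     indexed_constituents = set()
--     word_index = 0
--     for index, token in enumerate(sp):
--         if token == '(':
--             backpointers.append(word_index)
--         elif token == ')':
--             start = backpointers.pop()
--             end = word_index
--             constituent = (start, end)
--             indexed_constituents.add(constituent)
--         else:
--             word_index += 1
--     return indexed_constituents
-- ===== SOURCE B (Python) =====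
-- def to_indexed_contituents(parse):
--     sp = parse.split()
--     if len(sp) == 1:
--         return {(0, 1)}
--     spans = set()
--
--     def group(i, w, start):
--         # consume tokens of one open group; return position/word after its ')'
--         while i < len(sp):
--             t = sp[i]
--             if t == '(':
--                 i, w = group(i + 1, w, w)
--             elif t == ')':
--                 spans.add((start, w))
--                 return i + 1, w
--             else:
--                 i += 1
--                 w += 1
--         return i, w  # unclosed group: no span for it
--
--     i = w = 0
--     while i < len(sp):
--         t = sp[i]
--         if t == '(':
--             i, w = group(i + 1, w, w)
--         elif t == ')':
--             i += 1  # stray close bracket: ignored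
--         else:
--             i += 1
--             w += 1
--     return spans
-- ===== Notes on version B (the rewrite author's own statement) =====
-- stated objective: alternative
-- what changed: Replaced the single-pass explicit-stack fold over tokens by a recursive-descent parser with a position cursor and word counter that emits each span when its group's closing bracket is consumed (A raises IndexError on an unmatched closing bracket token; those inputs are outside Pre_, where B simply ignores it).
import Mathlib
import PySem

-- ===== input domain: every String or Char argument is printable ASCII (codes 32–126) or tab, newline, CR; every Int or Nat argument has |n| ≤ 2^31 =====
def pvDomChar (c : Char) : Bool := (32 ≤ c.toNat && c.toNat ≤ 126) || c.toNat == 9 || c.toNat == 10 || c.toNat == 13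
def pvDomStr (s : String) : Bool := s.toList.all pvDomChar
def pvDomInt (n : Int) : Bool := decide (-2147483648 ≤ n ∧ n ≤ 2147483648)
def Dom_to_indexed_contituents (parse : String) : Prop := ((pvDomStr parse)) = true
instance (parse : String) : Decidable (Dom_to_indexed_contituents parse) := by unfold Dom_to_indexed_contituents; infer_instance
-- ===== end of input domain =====

-- B replaces A's explicit-stack fold by a recursive-descent parser (alternative decomposition, same cost).

-- ===== PORT A =====
-- loop body of A's for-loop: state = (backpointers, indexed_constituents, word_index)
def stepA (st : List Int × PySem.Set (Int × Int) × Int) (token : String) :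
    List Int × PySem.Set (Int × Int) × Int :=
  if token = "(" then (st.2.2 :: st.1, st.2.1, st.2.2)
  else if token = ")" then
    match st.1 with
    | [] => st  -- Python raises IndexError (pop from empty list) here; excluded by Pre_
    | s :: rest => (rest, PySem.Set.add st.2.1 (s, st.2.2), st.2.2)
  else (st.1, st.2.1, st.2.2 + 1)

def to_indexed_contituents (parse : String) : List (Int × Int) :=
  let sp := PySem.Str.split₀ parse
  if sp.length = 1 then PySem.Set.ofList [((0 : Int), (1 : Int))]
  else (sp.foldl stepA ([], PySem.Set.empty, 0)).2.1

-- ===== PORT B =====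
-- consume the tokens of one open group; returns (remaining tokens, word index, spans)
-- (fuel only makes the recursion total; fuel = token count always suffices)
def pgGroup (fuel : Nat) (tokens : List String) (w start : Int)
    (acc : PySem.Set (Int × Int)) : List String × Int × PySem.Set (Int × Int) :=
  match fuel, tokens with
  | _, [] => ([], w, acc)          -- unclosed group: no span for it
  | 0, ts => (ts, w, acc)          -- fuel guard, never reached for fuel ≥ tokens.length
  | f + 1, t :: rest =>
    if t = "(" then
      let r := pgGroup f rest w w acc
      pgGroup f r.1 r.2.1 start r.2.2
    else if t = ")" then (rest, w, PySem.Set.add acc (start, w))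
    else pgGroup f rest (w + 1) start acc

-- drive the group parser across the top-level token stream
def pgTop (fuel : Nat) (tokens : List String) (w : Int)
    (acc : PySem.Set (Int × Int)) : Int × PySem.Set (Int × Int) :=
  match fuel, tokens with
  | _, [] => (w, acc)
  | 0, _ => (w, acc)               -- fuel guard, never reached for fuel ≥ tokens.length
  | f + 1, t :: rest =>
    if t = "(" then
      let r := pgGroup f rest w w acc
      pgTop f r.1 r.2.1 r.2.2
    else if t = ")" then pgTop f rest w acc  -- stray close bracket: ignored
    else pgTop f rest (w + 1) acc

def to_indexed_contituents_alt (parse : String) : List (Int × Int) :=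
  let sp := PySem.Str.split₀ parse
  if sp.length = 1 then PySem.Set.ofList [((0 : Int), (1 : Int))]
  else (pgTop sp.length sp 0 PySem.Set.empty).2

-- ===== PRECONDITION & SPEC =====
-- Pre_ excludes exactly the inputs on which Python A raises IndexError (pop from an empty
-- stack): a token list of length other than one having a prefix with more closing than
-- opening bracket tokens.
def Pre_to_indexed_contituents (parse : String) : Prop :=
  (PySem.Str.split₀ parse).length = 1 ∨
    ∀ i < (PySem.Str.split₀ parse).length + 1,
      ((PySem.Str.split₀ parse).take i).count ")" ≤ ((PySem.Str.split₀ parse).take i).count "("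
instance (parse : String) : Decidable (Pre_to_indexed_contituents parse) := by
  unfold Pre_to_indexed_contituents; infer_instance

def pvWitness_to_indexed_contituents : String := "( a ( b c ) )"

def Spec_to_indexed_contituents (parse : String) (out : List (Int × Int)) : Prop :=
  out = to_indexed_contituents_alt parse
instance (parse : String) (out : List (Int × Int)) : Decidable (Spec_to_indexed_contituents parse out) := by
  unfold Spec_to_indexed_contituents; infer_instance

-- ===== CLAIM (what is proved, stated in full; the proofs are below) =====
def Claim_equal_to_indexed_contituents : Prop := ∀ (parse : String),
  Dom_to_indexed_contituents parse → Pre_to_indexed_contituents parse →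
    Spec_to_indexed_contituents parse (to_indexed_contituents parse)

-- ===== LEMMAS AND PROOFS =====

-- Running A's stack fold over the tokens a group parse consumes, starting with `start` on
-- top of the stack, pops exactly that `start` and records the same spans.

lemma pgGroup_cons (f : Nat) (t : String) (rest : List String) (w start : Int)
    (acc : PySem.Set (Int × Int)) :
    pgGroup (f + 1) (t :: rest) w start acc =
      if t = "(" then
        pgGroup f (pgGroup f rest w w acc).1 (pgGroup f rest w w acc).2.1 start
          (pgGroup f rest w w acc).2.2
      else if t = ")" then (rest, w, PySem.Set.add acc (start, w))
      else pgGroup f rest (w + 1) start acc := rfl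

lemma pgTop_cons (f : Nat) (t : String) (rest : List String) (w : Int)
    (acc : PySem.Set (Int × Int)) :
    pgTop (f + 1) (t :: rest) w acc =
      if t = "(" then
        pgTop f (pgGroup f rest w w acc).1 (pgGroup f rest w w acc).2.1
          (pgGroup f rest w w acc).2.2
      else if t = ")" then pgTop f rest w acc
      else pgTop f rest (w + 1) acc := rfl

lemma pgGroup_nil (fuel : Nat) (w start : Int) (acc : PySem.Set (Int × Int)) :
    pgGroup fuel [] w start acc = ([], w, acc) := by cases fuel <;> rfl

lemma pgTop_nil (fuel : Nat) (w : Int) (acc : PySem.Set (Int × Int)) :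
    pgTop fuel [] w acc = (w, acc) := by cases fuel <;> rfl

lemma pgGroup_bridge : ∀ (fuel : Nat) (tokens : List String) (w start : Int)
    (cs : PySem.Set (Int × Int)), tokens.length ≤ fuel →
    ∃ pre, tokens = pre ++ (pgGroup fuel tokens w start cs).1 ∧
      ((∀ bp, List.foldl stepA (start :: bp, cs, w) pre =
          (bp, (pgGroup fuel tokens w start cs).2.2, (pgGroup fuel tokens w start cs).2.1)) ∨
       ((pgGroup fuel tokens w start cs).1 = [] ∧ ∀ bp, ∃ st,
          List.foldl stepA (start :: bp, cs, w) pre =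
            (st ++ start :: bp, (pgGroup fuel tokens w start cs).2.2,
              (pgGroup fuel tokens w start cs).2.1))) := by
  intro fuel
  induction fuel with
  | zero =>
    intro tokens w start cs hlen
    have h : tokens = [] := List.eq_nil_of_length_eq_zero (Nat.le_zero.mp hlen)
    subst h
    exact ⟨[], by simp [pgGroup_nil], Or.inr ⟨by simp [pgGroup_nil],
      fun bp => ⟨[], by simp [pgGroup_nil]⟩⟩⟩
  | succ f ih =>
    intro tokens w start cs hlen
    match tokens with
    | [] =>
      exact ⟨[], by simp [pgGroup_nil], Or.inr ⟨by simp [pgGroup_nil],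
        fun bp => ⟨[], by simp [pgGroup_nil]⟩⟩⟩
    | t :: rest =>
      have hlen' : rest.length ≤ f := by simpa using hlen
      by_cases hopen : t = "("
      · -- open bracket: inner group then continuation
        obtain ⟨p1, hp1, hd1⟩ := ih rest w w cs hlen'
        have hg : pgGroup (f + 1) (t :: rest) w start cs =
            pgGroup f (pgGroup f rest w w cs).1 (pgGroup f rest w w cs).2.1 start
              (pgGroup f rest w w cs).2.2 := by
          rw [pgGroup_cons, if_pos hopen]
        set r1 := pgGroup f rest w w cs with hr1
        rcases hd1 with hA1 | ⟨hnil, hE1⟩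
        · -- inner group closed
          have hlen2 : r1.1.length ≤ f := by
            have := congrArg List.length hp1; simp at this; omega
          obtain ⟨p2, hp2, hd2⟩ := ih r1.1 r1.2.1 start r1.2.2 hlen2
          refine ⟨t :: (p1 ++ p2), ?_, ?_⟩
          · rw [hg]
            conv_lhs => rw [hp1, hp2]
            simp
          · have hfold : ∀ bp, List.foldl stepA (start :: bp, cs, w) (t :: (p1 ++ p2)) =
                List.foldl stepA (start :: bp, r1.2.2, r1.2.1) p2 := by
              intro bp
              have hstep : stepA (start :: bp, cs, w) t = (w :: start :: bp, cs, w) := by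
                simp [stepA, hopen]
              simp only [List.foldl_cons, hstep, List.foldl_append]
              rw [hA1 (start :: bp)]
            rcases hd2 with hA2 | ⟨hnil2, hE2⟩
            · exact Or.inl (fun bp => by rw [hfold bp, hg]; exact hA2 bp)
            · refine Or.inr ⟨by rw [hg]; exact hnil2, fun bp => ?_⟩
              obtain ⟨st, hst⟩ := hE2 bp
              exact ⟨st, by rw [hfold bp, hg]; exact hst⟩
        · -- inner group ran off the end: r1.1 = [], continuation is trivial
          have hR : pgGroup (f + 1) (t :: rest) w start cs = ([], r1.2.1, r1.2.2) := by
            rw [hg, hnil, pgGroup_nil]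
          refine ⟨t :: p1, by rw [hR]; simpa [hnil] using congrArg (t :: ·) hp1, ?_⟩
          refine Or.inr ⟨by rw [hR], fun bp => ?_⟩
          obtain ⟨st, hst⟩ := hE1 (start :: bp)
          refine ⟨st ++ [w], ?_⟩
          have hstep : stepA (start :: bp, cs, w) t = (w :: start :: bp, cs, w) := by
            simp [stepA, hopen]
          rw [hR]
          simp only [List.foldl_cons, hstep]
          rw [hst]; simp
      · by_cases hclose : t = ")"
        · -- close bracket: the group ends here
          have hg : pgGroup (f + 1) (t :: rest) w start cs =
              (rest, w, PySem.Set.add cs (start, w)) := by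
            rw [pgGroup_cons, if_neg hopen, if_pos hclose]
          refine ⟨[t], by simp [hg], Or.inl fun bp => ?_⟩
          rw [hg]
          simp [stepA, hclose]
        · -- word token
          have hg : pgGroup (f + 1) (t :: rest) w start cs =
              pgGroup f rest (w + 1) start cs := by
            rw [pgGroup_cons, if_neg hopen, if_neg hclose]
          obtain ⟨p, hp, hd⟩ := ih rest (w + 1) start cs hlen'
          have hstep : ∀ bp, stepA (start :: bp, cs, w) t = (start :: bp, cs, w + 1) := by
            intro bp; simp [stepA, hopen, hclose]
          refine ⟨t :: p, by rw [hg]; simpa using congrArg (t :: ·) hp, ?_⟩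
          rcases hd with hA | ⟨hnil, hE⟩
          · exact Or.inl fun bp => by
              rw [hg]; simp only [List.foldl_cons, hstep bp]; exact hA bp
          · refine Or.inr ⟨by rw [hg]; exact hnil, fun bp => ?_⟩
            obtain ⟨st, hst⟩ := hE bp
            exact ⟨st, by rw [hg]; simp only [List.foldl_cons, hstep bp]; exact hst⟩

lemma pgTop_bridge : ∀ (fuel : Nat) (tokens : List String) (w : Int)
    (cs : PySem.Set (Int × Int)), tokens.length ≤ fuel →
    (List.foldl stepA ([], cs, w) tokens).2.1 = (pgTop fuel tokens w cs).2 := by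
  intro fuel
  induction fuel with
  | zero =>
    intro tokens w cs hlen
    have h : tokens = [] := List.eq_nil_of_length_eq_zero (Nat.le_zero.mp hlen)
    subst h; rfl
  | succ f ih =>
    intro tokens w cs hlen
    match tokens with
    | [] => rfl
    | t :: rest =>
      have hlen' : rest.length ≤ f := by simpa using hlen
      by_cases hopen : t = "("
      · obtain ⟨pre, hp, hd⟩ := pgGroup_bridge f rest w w cs hlen'
        set r := pgGroup f rest w w cs with hr
        have hg : pgTop (f + 1) (t :: rest) w cs = pgTop f r.1 r.2.1 r.2.2 := by
          rw [pgTop_cons, if_pos hopen]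
        have hstep : stepA (([] : List Int), cs, w) t = ([w], cs, w) := by
          simp [stepA, hopen]
        rcases hd with hA | ⟨hnil, hE⟩
        · have hlen2 : r.1.length ≤ f := by
            have := congrArg List.length hp; simp at this; omega
          rw [hg, ← ih r.1 r.2.1 r.2.2 hlen2]
          simp only [List.foldl_cons, hstep, hp, List.foldl_append]
          rw [hA ([] : List Int)]
        · obtain ⟨st, hst⟩ := hE ([] : List Int)
          rw [hg, hnil, pgTop_nil]
          simp only [List.foldl_cons, hstep, hp, hnil, List.append_nil]
          rw [hst]
      · by_cases hclose : t = ")"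
        · have hstep : stepA (([] : List Int), cs, w) t = ([], cs, w) := by
            simp [stepA, hclose]
          have hg : pgTop (f + 1) (t :: rest) w cs = pgTop f rest w cs := by
            rw [pgTop_cons, if_neg hopen, if_pos hclose]
          rw [hg, ← ih rest w cs hlen']
          simp only [List.foldl_cons, hstep]
        · have hstep : stepA (([] : List Int), cs, w) t = ([], cs, w + 1) := by
            simp [stepA, hopen, hclose]
          have hg : pgTop (f + 1) (t :: rest) w cs = pgTop f rest (w + 1) cs := by
            rw [pgTop_cons, if_neg hopen, if_neg hclose]
          rw [hg, ← ih rest (w + 1) cs hlen']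
          simp only [List.foldl_cons, hstep]

-- ===== VERDICT (by name: the statement is the Claim_ definition above) =====
theorem to_indexed_contituents_spec : Claim_equal_to_indexed_contituents := by
  intro parse _ _
  unfold Spec_to_indexed_contituents to_indexed_contituents to_indexed_contituents_alt
  simp only []
  by_cases h : (PySem.Str.split₀ parse).length = 1
  · simp [h]
  · simp [h, pgTop_bridge _ _ _ _ (le_refl _)]
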